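-- pv_equiv track=rewrite | github.com/haberrj/network_pong | main.py | OrderUsers
-- ===== SOURCE A (Python) =====
-- def OrderUsers(data):
--     '''Will order the user positions to be correct based on the received values.
--     @param data: A list of lists of the received values from the server.
--     @return user1_pos: A list with the position of user 1
--     @return user2_pos: A list with the position of user 2
--     @return user3_pos: A list with the position of user 3
--     @return user4_pos: A list with the position of user 4
--     '''
--     user1_pos = [0,0]
--     user2_pos = [0,0]
--     user3_pos = [0,0]
--     user4_pos = [0,0]
--     for val in data:
--         if(val[0] == 1):
--             user1_pos[0] = val[1]
--             user1_pos[1] = val[2]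
--         elif(val[0] == 2):
--             user2_pos[0] = val[1]
--             user2_pos[1] = val[2]
--         elif(val[0] == 3):
--             user3_pos[0] = val[1]
--             user3_pos[1] = val[2]
--         else:
--             user4_pos[0] = val[1]
--             user4_pos[1] = val[2]
--     return user1_pos, user2_pos, user3_pos, user4_pos
-- ===== SOURCE B (Python) =====
-- def OrderUsers(data):
--     '''Each user's final position is simply the last update addressed to it:
--     search the data backwards and return the first matching row per user.'''
--     def last_update(matches):
--         for val in reversed(data):
--             if matches(val[0]):
--                 return [val[1], val[2]]
--         return [0, 0]
--     return (last_update(lambda k: k == 1),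
--             last_update(lambda k: k == 2),
--             last_update(lambda k: k == 3),
--             last_update(lambda k: k not in (1, 2, 3)))
-- ===== Notes on version B (the rewrite author's own statement) =====
-- stated objective: alternative
-- what changed: Replaces the single forward fold over four mutable accumulators (last write wins) with four independent backward first-match searches: each user's position is the first row in reversed(data) addressed to it, so no running state is maintained at all.
import Mathlib
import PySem

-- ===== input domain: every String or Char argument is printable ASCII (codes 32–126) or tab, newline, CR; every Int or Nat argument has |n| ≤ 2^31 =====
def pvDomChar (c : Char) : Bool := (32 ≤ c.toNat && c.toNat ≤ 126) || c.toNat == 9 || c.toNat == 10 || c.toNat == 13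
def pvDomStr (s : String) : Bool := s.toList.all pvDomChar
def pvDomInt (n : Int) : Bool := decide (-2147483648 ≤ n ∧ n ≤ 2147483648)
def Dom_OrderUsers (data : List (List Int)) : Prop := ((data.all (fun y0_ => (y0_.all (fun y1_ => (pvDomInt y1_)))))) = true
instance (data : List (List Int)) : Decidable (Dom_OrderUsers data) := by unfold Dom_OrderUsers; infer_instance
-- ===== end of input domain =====

-- B replaces A's forward fold over four mutable accumulators by four independent
-- backward first-match searches (the last update per user), keeping no running state.

-- ===== PORT A =====
-- one loop iteration of A: four named position lists, if/elif/else on val[0],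
-- mutation of the two cells ported as List.set at indices 0 and 1
def OUstepA (st : List Int × List Int × List Int × List Int) (val : List Int) :
    List Int × List Int × List Int × List Int :=
  let v0 := (PySem.List.pyGet? val 0).getD 0
  let v1 := (PySem.List.pyGet? val 1).getD 0
  let v2 := (PySem.List.pyGet? val 2).getD 0
  if v0 = 1 then (((st.1.set 0 v1).set 1 v2), st.2.1, st.2.2.1, st.2.2.2)
  else if v0 = 2 then (st.1, ((st.2.1.set 0 v1).set 1 v2), st.2.2.1, st.2.2.2)
  else if v0 = 3 then (st.1, st.2.1, ((st.2.2.1.set 0 v1).set 1 v2), st.2.2.2)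
  else (st.1, st.2.1, st.2.2.1, ((st.2.2.2.set 0 v1).set 1 v2))

def OrderUsers (data : List (List Int)) : List Int × List Int × List Int × List Int :=
  data.foldl OUstepA ([0,0], [0,0], [0,0], [0,0])

-- ===== PORT B =====
-- last_update: first row of the (already reversed) data whose key matches
def OUfind (p : Int → Bool) : List (List Int) → List Int
  | [] => [0, 0]
  | v :: t =>
    if p ((PySem.List.pyGet? v 0).getD 0) then
      [(PySem.List.pyGet? v 1).getD 0, (PySem.List.pyGet? v 2).getD 0]
    else OUfind p t

def OrderUsers_alt (data : List (List Int)) : List Int × List Int × List Int × List Int :=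
  let r := data.reverse
  (OUfind (fun k => k == 1) r, OUfind (fun k => k == 2) r, OUfind (fun k => k == 3) r,
   OUfind (fun k => !(k == 1 || k == 2 || k == 3)) r)

-- ===== PRECONDITION & SPEC =====
-- Pre_: every row has at least three entries; on shorter rows the Python A
-- raises IndexError (val[0]/val[1]/val[2]).
def Pre_OrderUsers (data : List (List Int)) : Prop :=
  ∀ row ∈ data, 3 ≤ row.length
instance (data : List (List Int)) : Decidable (Pre_OrderUsers data) := by
  unfold Pre_OrderUsers; infer_instance
def pvWitness_OrderUsers : List (List Int) := [[1, 5, 6], [4, 2, 3], [2, 7, 8]]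
def Spec_OrderUsers (data : List (List Int)) (out : List Int × List Int × List Int × List Int) : Prop := out = OrderUsers_alt data
instance (data : List (List Int)) (out : List Int × List Int × List Int × List Int) : Decidable (Spec_OrderUsers data out) := by unfold Spec_OrderUsers; infer_instance

-- ===== CLAIM (what is proved, stated in full; the proofs are below) =====
def Claim_equal_OrderUsers : Prop := ∀ (data : List (List Int)), Dom_OrderUsers data → Pre_OrderUsers data → Spec_OrderUsers data (OrderUsers data)

-- ===== LEMMAS AND PROOFS =====
theorem OUfind_shape (p : Int → Bool) (l : List (List Int)) :
    ∃ a b, OUfind p l = [a, b] := by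
  induction l with
  | nil => exact ⟨0, 0, rfl⟩
  | cons v t ih =>
    by_cases h : p ((PySem.List.pyGet? v 0).getD 0)
    · exact ⟨(PySem.List.pyGet? v 1).getD 0, (PySem.List.pyGet? v 2).getD 0, by simp [OUfind, h]⟩
    · simpa [OUfind, h] using ih

-- the fold over A's four accumulators equals the four backward first-match searches
theorem OU_fold_eq (m : List (List Int)) :
    m.foldl OUstepA ([0,0], [0,0], [0,0], [0,0]) =
      (OUfind (fun k => k == 1) m.reverse, OUfind (fun k => k == 2) m.reverse,
       OUfind (fun k => k == 3) m.reverse,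
       OUfind (fun k => !(k == 1 || k == 2 || k == 3)) m.reverse) := by
  induction m using List.reverseRecOn with
  | nil => simp [OUfind]
  | append_singleton l v ih =>
    rw [List.foldl_append, List.foldl_cons, List.foldl_nil, ih]
    have h1 := OUfind_shape (fun k => k == 1) l.reverse
    have h2 := OUfind_shape (fun k => k == 2) l.reverse
    have h3 := OUfind_shape (fun k => k == 3) l.reverse
    have h4 := OUfind_shape (fun k => !(k == 1 || k == 2 || k == 3)) l.reverse
    obtain ⟨a1, b1, e1⟩ := h1; obtain ⟨a2, b2, e2⟩ := h2
    obtain ⟨a3, b3, e3⟩ := h3; obtain ⟨a4, b4, e4⟩ := h4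
    simp only [Bool.not_or] at e4
    set v0 := (PySem.List.pyGet? v 0).getD 0 with hv0
    by_cases c1 : v0 = 1
    · simp [OUstepA, OUfind, ← hv0, c1, e1, e2, e3, e4, List.set]
    · by_cases c2 : v0 = 2
      · simp [OUstepA, OUfind, ← hv0, c1, c2, e1, e2, e3, e4, List.set]
      · by_cases c3 : v0 = 3
        · simp [OUstepA, OUfind, ← hv0, c1, c2, c3, e1, e2, e3, e4, List.set]
        · simp [OUstepA, OUfind, ← hv0, c1, c2, c3, e1, e2, e3, e4, List.set]

-- ===== VERDICT (by name: the statement is the Claim_ definition above) =====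
theorem OrderUsers_spec : Claim_equal_OrderUsers := by
  intro data _ _
  unfold Spec_OrderUsers OrderUsers OrderUsers_alt
  exact OU_fold_eq data
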